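-- pv_equiv track=rewrite | github.com/araray/llmcore | tools/generate_poe_cards.py | _guess_context_length
-- ===== SOURCE A (Python) =====
-- def _guess_context_length(model_id: str) -> int:
--     """Heuristic context length based on known model families.
--
--     Since Poe doesn't expose context length in its /v1/models response,
--     we map well-known bots to their upstream provider's context limits.
--
--     Args:
--         model_id: The Poe bot name.
--
--     Returns:
--         Best-guess context length in tokens.
--     """
--     lower = model_id.lower()
--
--     # GPT-5.x family
--     if "gpt-5" in lower:
--         return 400_000
--
--     # GPT-4.1 family
--     if "gpt-4.1" in lower:
--         return 1_048_576
--
--     # GPT-4o family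
--     if "gpt-4o" in lower:
--         return 128_000
--
--     # Claude families
--     if "claude" in lower:
--         if "opus-4" in lower or "sonnet-4" in lower:
--             return 200_000
--         if "haiku" in lower:
--             return 200_000
--         return 200_000
--
--     # Gemini families
--     if "gemini" in lower:
--         if "3" in lower:
--             return 1_000_000
--         if "2.5" in lower or "2.0" in lower:
--             return 1_000_000
--         return 128_000
--
--     # Grok
--     if "grok" in lower:
--         return 131_072
--
--     # o-series reasoning
--     if lower.startswith("o1") or lower.startswith("o3") or lower.startswith("o4"):
--         return 200_000
--
--     # DeepSeek
--     if "deepseek" in lower: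
--         return 128_000
--
--     # Llama
--     if "llama" in lower:
--         return 128_000
--
--     # Image/Video generation bots (context doesn't apply the same way)
--     if any(t in lower for t in ("sora", "veo", "dall-e", "imagen", "flux", "sdxl")):
--         return 4_096
--
--     # Conservative default
--     return 128_000
-- ===== SOURCE B (Python) =====
-- # Ranked-match table: (required substrings) -> (priority, context length).
-- # Unlike a first-match chain, ALL rules are evaluated and the hit with the
-- # smallest priority wins, so the table order is irrelevant (it is deliberately
-- # not A's order).
-- _RANKED = {
--     ("llama",): (9, 128_000),
--     ("gemini", "2.0"): (4, 1_000_000),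
--     ("sdxl",): (10, 4_096),
--     ("gpt-4o",): (2, 128_000),
--     ("claude",): (3, 200_000),
--     ("imagen",): (10, 4_096),
--     ("gemini", "3"): (4, 1_000_000),
--     ("grok",): (6, 131_072),
--     ("sora",): (10, 4_096),
--     ("gpt-5",): (0, 400_000),
--     ("deepseek",): (8, 128_000),
--     ("flux",): (10, 4_096),
--     ("gemini",): (5, 128_000),
--     ("gpt-4.1",): (1, 1_048_576),
--     ("veo",): (10, 4_096),
--     ("gemini", "2.5"): (4, 1_000_000),
--     ("dall-e",): (10, 4_096),
-- }
--
--
-- def _guess_context_length(model_id: str) -> int: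
--     lower = model_id.lower()
--     best = (11, 128_000)  # default rank/context
--     for words, rank in _RANKED.items():
--         if rank[0] < best[0] and all(w in lower for w in words):
--             best = rank
--     # o-series reasoning bots: a 2-character prefix lookup, ranked 7
--     if 7 < best[0] and lower[:2] in ("o1", "o3", "o4"):
--         best = (7, 200_000)
--     return best[1]
-- ===== Notes on version B (the rewrite author's own statement) =====
-- stated objective: alternative
-- what changed: Replaced A's first-match short-circuit if-chain by an exhaustive ranked-match scan: every (required-substrings -> priority, context) table entry is evaluated and the smallest-priority hit wins (the table is deliberately not in A's order), with the o-series rule done as a 2-character prefix-slice lookup instead of three startswith calls.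
import Mathlib
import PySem

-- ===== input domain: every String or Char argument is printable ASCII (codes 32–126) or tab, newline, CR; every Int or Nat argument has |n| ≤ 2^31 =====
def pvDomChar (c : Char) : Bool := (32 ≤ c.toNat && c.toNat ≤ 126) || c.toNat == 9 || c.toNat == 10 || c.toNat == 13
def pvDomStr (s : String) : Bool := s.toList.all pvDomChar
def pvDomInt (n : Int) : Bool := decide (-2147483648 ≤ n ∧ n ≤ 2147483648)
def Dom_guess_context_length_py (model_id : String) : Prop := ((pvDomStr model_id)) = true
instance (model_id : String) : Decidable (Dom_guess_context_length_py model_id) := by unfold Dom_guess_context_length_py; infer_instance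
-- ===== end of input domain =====

-- B replaces A's first-match if-chain by an exhaustive ranked-match table scan (the
-- smallest-priority hit among ALL matching rules wins, so the table order is irrelevant
-- and deliberately not A's order); objective: alternative, same cost.

-- ===== PORT A =====
def guess_context_length_py (model_id : String) : Int :=
  let lower := PySem.Str.lower model_id
  if PySem.Str.isIn "gpt-5" lower then 400000
  else if PySem.Str.isIn "gpt-4.1" lower then 1048576
  else if PySem.Str.isIn "gpt-4o" lower then 128000
  else if PySem.Str.isIn "claude" lower then
    (if PySem.Str.isIn "opus-4" lower || PySem.Str.isIn "sonnet-4" lower then 200000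
     else if PySem.Str.isIn "haiku" lower then 200000
     else 200000)
  else if PySem.Str.isIn "gemini" lower then
    (if PySem.Str.isIn "3" lower then 1000000
     else if PySem.Str.isIn "2.5" lower || PySem.Str.isIn "2.0" lower then 1000000
     else 128000)
  else if PySem.Str.isIn "grok" lower then 131072
  else if PySem.Str.startswith lower "o1" || PySem.Str.startswith lower "o3" || PySem.Str.startswith lower "o4" then 200000
  else if PySem.Str.isIn "deepseek" lower then 128000
  else if PySem.Str.isIn "llama" lower then 128000
  else if ["sora", "veo", "dall-e", "imagen", "flux", "sdxl"].any (fun t => PySem.Str.isIn t lower) then 4096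
  else 128000

-- ===== PORT B =====
-- B-side helper: ranked-match table (required substrings, (priority, context)); NOT in A's order
def gclRanked : List (List String × Int × Int) :=
  [ (["llama"], 9, 128000),
    (["gemini", "2.0"], 4, 1000000),
    (["sdxl"], 10, 4096),
    (["gpt-4o"], 2, 128000),
    (["claude"], 3, 200000),
    (["imagen"], 10, 4096),
    (["gemini", "3"], 4, 1000000),
    (["grok"], 6, 131072),
    (["sora"], 10, 4096),
    (["gpt-5"], 0, 400000),
    (["deepseek"], 8, 128000),
    (["flux"], 10, 4096),
    (["gemini"], 5, 128000),
    (["gpt-4.1"], 1, 1048576),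
    (["veo"], 10, 4096),
    (["gemini", "2.5"], 4, 1000000),
    (["dall-e"], 10, 4096) ]

-- B-side helper: one loop step — adopt the rule if it outranks the current best and matches
def gclStep (lower : String) (best : Int × Int) (r : List String × Int × Int) : Int × Int :=
  if r.2.1 < best.1 && r.1.all (fun w => PySem.Str.isIn w lower) then r.2 else best

def guess_context_length_py_alt (model_id : String) : Int :=
  let lower := PySem.Str.lower model_id
  let best := gclRanked.foldl (gclStep lower) ((11 : Int), (128000 : Int))
  let best :=
    if 7 < best.1 && ["o1", "o3", "o4"].contains (PySem.Str.slice lower (some 0) (some 2))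
    then ((7 : Int), (200000 : Int)) else best
  best.2

-- ===== PRECONDITION & SPEC =====
def Spec_guess_context_length_py (model_id : String) (out : Int) : Prop := out = guess_context_length_py_alt model_id
instance (model_id : String) (out : Int) : Decidable (Spec_guess_context_length_py model_id out) := by unfold Spec_guess_context_length_py; infer_instance

-- ===== CLAIM (what is proved, stated in full; the proofs are below) =====
def Claim_equal_guess_context_length_py : Prop := ∀ (model_id : String), Dom_guess_context_length_py model_id → Spec_guess_context_length_py model_id (guess_context_length_py model_id)

-- ===== LEMMAS AND PROOFS =====

-- Python's `lower.startswith(p)` for a 2-char prefix equals `lower[:2] == p`.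
theorem gcl_startswith_eq_slice (s p : String) (hp : p.toList.length = 2) :
    PySem.Str.startswith s p = (PySem.Str.slice s (some 0) (some 2) == p) := by
  rw [Bool.eq_iff_iff]
  have h1 : PySem.Str.startswith s p = true ↔ p.toList <+: s.toList := by
    simp [PySem.Chars.startswith_iff]
  have hto : (PySem.Str.slice s (some 0) (some 2)).toList = s.toList.take 2 := by
    simp only [PySem.Str.toList_slice, PySem.Chars.slice_eq_listSlice,
      PySem.List.slice_zero_start,
      PySem.List.slice_to (xs := s.toList) (b := 2) (by norm_num)]
    rfl
  have h2 : (PySem.Str.slice s (some 0) (some 2) == p) = true ↔ s.toList.take 2 = p.toList := by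
    rw [beq_iff_eq]
    constructor
    · intro h; rw [← hto, h]
    · intro h
      have := congrArg String.ofList h
      rwa [← hto, String.ofList_toList, String.ofList_toList] at this
  rw [h1, h2, List.prefix_iff_eq_take, hp]
  exact ⟨fun h => h.symm, fun h => h.symm⟩

-- One step of the loop, by cases on its condition.
theorem gclStep_unmatched (lower : String) (best : Int × Int) (r : List String × Int × Int)
    (h : r.1.all (fun w => PySem.Str.isIn w lower) = false) : gclStep lower best r = best := by
  unfold gclStep; rw [h, Bool.and_false]; rfl

theorem gclStep_ge (lower : String) (best : Int × Int) (r : List String × Int × Int)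
    (h : best.1 ≤ r.2.1) : gclStep lower best r = best := by
  unfold gclStep; rw [if_neg]; intro hc
  have : r.2.1 < best.1 := by
    have := Bool.and_elim_left hc; simpa using this
  omega

theorem gclStep_take (lower : String) (best : Int × Int) (r : List String × Int × Int)
    (hM : r.1.all (fun w => PySem.Str.isIn w lower) = true)
    (hp : r.2.1 < best.1) : gclStep lower best r = r.2 := by
  unfold gclStep; rw [hM, Bool.and_true, if_pos]; simpa using hp

-- If no rule of the list matches with a strictly smaller priority, the fold keeps `best`.
theorem gclFoldl_keep (lower : String) (l : List (List String × Int × Int)) (best : Int × Int)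
    (h : ∀ r ∈ l, r.1.all (fun w => PySem.Str.isIn w lower) = true → best.1 ≤ r.2.1) :
    l.foldl (gclStep lower) best = best := by
  induction l with
  | nil => rfl
  | cons r t ih =>
    have hstep : gclStep lower best r = best := by
      rcases hM : r.1.all (fun w => PySem.Str.isIn w lower) with _ | _
      · exact gclStep_unmatched lower best r hM
      · exact gclStep_ge lower best r (h r (List.mem_cons_self) hM)
    rw [List.foldl_cons, hstep]
    exact ih (fun r' hr' => h r' (List.mem_cons_of_mem _ hr'))

-- If every matching rule has priority > c and best does too, the fold's priority stays > c.
theorem gclFoldl_gt (lower : String) (c : Int) (l : List (List String × Int × Int))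
    (best : Int × Int) (hb : c < best.1)
    (h : ∀ r ∈ l, r.1.all (fun w => PySem.Str.isIn w lower) = true → c < r.2.1) :
    c < (l.foldl (gclStep lower) best).1 := by
  induction l generalizing best with
  | nil => exact hb
  | cons r t ih =>
    rw [List.foldl_cons]
    refine ih (gclStep lower best r) ?_ (fun r' hr' => h r' (List.mem_cons_of_mem _ hr'))
    rcases hM : r.1.all (fun w => PySem.Str.isIn w lower) with _ | _
    · rw [gclStep_unmatched lower best r hM]; exact hb
    · by_cases hp : r.2.1 < best.1
      · rw [gclStep_take lower best r hM hp]
        exact h r (List.mem_cons_self) hM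
      · rw [gclStep_ge lower best r (le_of_not_gt hp)]; exact hb

-- The fold returns the (priority, context) pair of a minimal matching rule.
theorem gclFoldl_min (lower : String) (l : List (List String × Int × Int))
    (best q : Int × Int) (hb : q.1 < best.1)
    (hex : ∃ r ∈ l, r.1.all (fun w => PySem.Str.isIn w lower) = true ∧ r.2 = q)
    (hmin : ∀ r ∈ l, r.1.all (fun w => PySem.Str.isIn w lower) = true →
      q.1 ≤ r.2.1 ∧ (r.2.1 = q.1 → r.2 = q)) :
    l.foldl (gclStep lower) best = q := by
  induction l generalizing best with
  | nil => simp at hex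
  | cons r t ih =>
    rw [List.foldl_cons]
    by_cases hM : r.1.all (fun w => PySem.Str.isIn w lower) = true
    · have hq := hmin r (List.mem_cons_self) hM
      by_cases hp : r.2.1 < best.1
      · rw [gclStep_take lower best r hM hp]
        by_cases heq : r.2.1 = q.1
        · rw [hq.2 heq]
          exact gclFoldl_keep lower t q
            (fun r' hr' hM' => (hmin r' (List.mem_cons_of_mem _ hr') hM').1)
        · have hlt : q.1 < r.2.1 := lt_of_le_of_ne hq.1 (fun e => heq e.symm)
          rcases hex with ⟨r', hr', hM', hq'⟩
          rcases List.mem_cons.mp hr' with rfl | hr't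
          · exact absurd (congrArg Prod.fst hq') heq
          · exact ih r.2 hlt ⟨r', hr't, hM', hq'⟩
              (fun r'' hr'' => hmin r'' (List.mem_cons_of_mem _ hr''))
      · rw [gclStep_ge lower best r (le_of_not_gt hp)]
        rcases hex with ⟨r', hr', hM', hq'⟩
        rcases List.mem_cons.mp hr' with rfl | hr't
        · exfalso
          have h1 := congrArg Prod.fst hq'
          simp only at h1
          omega
        · exact ih best hb ⟨r', hr't, hM', hq'⟩
            (fun r'' hr'' => hmin r'' (List.mem_cons_of_mem _ hr''))
    · have hMf : r.1.all (fun w => PySem.Str.isIn w lower) = false :=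
        Bool.eq_false_iff.mpr hM
      rw [gclStep_unmatched lower best r hMf]
      rcases hex with ⟨r', hr', hM', hq'⟩
      rcases List.mem_cons.mp hr' with rfl | hr't
      · exact absurd hM' hM
      · exact ih best hb ⟨r', hr't, hM', hq'⟩
          (fun r'' hr'' => hmin r'' (List.mem_cons_of_mem _ hr''))

-- ===== VERDICT (by name: the statement is the Claim_ definition above) =====
set_option maxHeartbeats 2000000 in
theorem guess_context_length_py_spec : Claim_equal_guess_context_length_py := by
  intro model_id _
  unfold Spec_guess_context_length_py guess_context_length_py guess_context_length_py_alt
  dsimp only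
  rw [gcl_startswith_eq_slice (PySem.Str.lower model_id) "o1" rfl,
      gcl_startswith_eq_slice (PySem.Str.lower model_id) "o3" rfl,
      gcl_startswith_eq_slice (PySem.Str.lower model_id) "o4" rfl]
  by_cases h0 : PySem.Str.isIn "gpt-5" (PySem.Str.lower model_id) = true
  · have hfold := gclFoldl_min (PySem.Str.lower model_id) gclRanked (11, 128000) ((0 : Int), (400000 : Int))
      (by norm_num)
      ⟨(["gpt-5"], 0, 400000), by simp [gclRanked],
        by simp only [List.all_cons, List.all_nil, Bool.and_true]; exact h0, rfl⟩
      (by intro r hr hM; simp only [gclRanked] at hr; fin_cases hr <;> simp_all)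
    rw [if_pos h0, hfold]
    simp
  rw [if_neg h0]
  by_cases h1 : PySem.Str.isIn "gpt-4.1" (PySem.Str.lower model_id) = true
  · have hfold := gclFoldl_min (PySem.Str.lower model_id) gclRanked (11, 128000) ((1 : Int), (1048576 : Int))
      (by norm_num)
      ⟨(["gpt-4.1"], 1, 1048576), by simp [gclRanked],
        by simp only [List.all_cons, List.all_nil, Bool.and_true]; exact h1, rfl⟩
      (by intro r hr hM; simp only [gclRanked] at hr; fin_cases hr <;> simp_all)
    rw [if_pos h1, hfold]
    simp
  rw [if_neg h1]
  by_cases h2 : PySem.Str.isIn "gpt-4o" (PySem.Str.lower model_id) = true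
  · have hfold := gclFoldl_min (PySem.Str.lower model_id) gclRanked (11, 128000) ((2 : Int), (128000 : Int))
      (by norm_num)
      ⟨(["gpt-4o"], 2, 128000), by simp [gclRanked],
        by simp only [List.all_cons, List.all_nil, Bool.and_true]; exact h2, rfl⟩
      (by intro r hr hM; simp only [gclRanked] at hr; fin_cases hr <;> simp_all)
    rw [if_pos h2, hfold]
    simp
  rw [if_neg h2]
  by_cases h3 : PySem.Str.isIn "claude" (PySem.Str.lower model_id) = true
  · have hfold := gclFoldl_min (PySem.Str.lower model_id) gclRanked (11, 128000) ((3 : Int), (200000 : Int))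
      (by norm_num)
      ⟨(["claude"], 3, 200000), by simp [gclRanked],
        by simp only [List.all_cons, List.all_nil, Bool.and_true]; exact h3, rfl⟩
      (by intro r hr hM; simp only [gclRanked] at hr; fin_cases hr <;> simp_all)
    rw [if_pos h3, ite_self, ite_self, hfold]
    simp
  rw [if_neg h3]
  by_cases h4 : PySem.Str.isIn "gemini" (PySem.Str.lower model_id) = true
  · rw [if_pos h4]
    by_cases h5 : PySem.Str.isIn "3" (PySem.Str.lower model_id) = true
    · have hfold := gclFoldl_min (PySem.Str.lower model_id) gclRanked (11, 128000) ((4 : Int), (1000000 : Int))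
        (by norm_num)
        ⟨(["gemini", "3"], 4, 1000000), by simp [gclRanked],
          by simp only [List.all_cons, List.all_nil, Bool.and_true]; rw [h4, h5]; rfl, rfl⟩
        (by intro r hr hM; simp only [gclRanked] at hr; fin_cases hr <;> simp_all)
      rw [if_pos h5, hfold]
      simp
    rw [if_neg h5]
    by_cases h6 : (PySem.Str.isIn "2.5" (PySem.Str.lower model_id) || PySem.Str.isIn "2.0" (PySem.Str.lower model_id)) = true
    · have hex : ∃ r ∈ gclRanked,
          (r.1.all fun w => PySem.Str.isIn w (PySem.Str.lower model_id)) = true ∧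
            r.2 = ((4 : Int), (1000000 : Int)) := by
        rcases Bool.or_eq_true_iff.mp h6 with h | h
        · exact ⟨(["gemini", "2.5"], 4, 1000000), by simp [gclRanked],
            by simp only [List.all_cons, List.all_nil, Bool.and_true]; rw [h4, h]; rfl, rfl⟩
        · exact ⟨(["gemini", "2.0"], 4, 1000000), by simp [gclRanked],
            by simp only [List.all_cons, List.all_nil, Bool.and_true]; rw [h4, h]; rfl, rfl⟩
      have hfold := gclFoldl_min (PySem.Str.lower model_id) gclRanked (11, 128000) ((4 : Int), (1000000 : Int))
        (by norm_num) hex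
        (by intro r hr hM; simp only [gclRanked] at hr; fin_cases hr <;> simp_all)
      rw [if_pos h6, hfold]
      simp
    · have hfold := gclFoldl_min (PySem.Str.lower model_id) gclRanked (11, 128000) ((5 : Int), (128000 : Int))
        (by norm_num)
        ⟨(["gemini"], 5, 128000), by simp [gclRanked],
          by simp only [List.all_cons, List.all_nil, Bool.and_true]; exact h4, rfl⟩
        (by intro r hr hM; simp only [gclRanked] at hr; fin_cases hr <;> simp_all)
      rw [if_neg h6, hfold]
      simp
  rw [if_neg h4]
  by_cases h8 : PySem.Str.isIn "grok" (PySem.Str.lower model_id) = true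
  · have hfold := gclFoldl_min (PySem.Str.lower model_id) gclRanked (11, 128000) ((6 : Int), (131072 : Int))
      (by norm_num)
      ⟨(["grok"], 6, 131072), by simp [gclRanked],
        by simp only [List.all_cons, List.all_nil, Bool.and_true]; exact h8, rfl⟩
      (by intro r hr hM; simp only [gclRanked] at hr; fin_cases hr <;> simp_all)
    rw [if_pos h8, hfold]
    simp
  rw [if_neg h8]
  by_cases h9 : ((PySem.Str.slice (PySem.Str.lower model_id) (some 0) (some 2) == "o1") ||
      (PySem.Str.slice (PySem.Str.lower model_id) (some 0) (some 2) == "o3") ||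
      (PySem.Str.slice (PySem.Str.lower model_id) (some 0) (some 2) == "o4")) = true
  · have hgt := gclFoldl_gt (PySem.Str.lower model_id) 7 gclRanked (11, 128000) (by norm_num)
      (by intro r hr hM; simp only [gclRanked] at hr; fin_cases hr <;> simp_all)
    have hco : (["o1", "o3", "o4"].contains
        (PySem.Str.slice (PySem.Str.lower model_id) (some 0) (some 2))) = true := by
      rcases Bool.or_eq_true_iff.mp h9 with h | h
      · rcases Bool.or_eq_true_iff.mp h with h' | h'
        · have : PySem.Str.slice (PySem.Str.lower model_id) (some 0) (some 2) = "o1" := by simpa using h'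
          rw [this]; decide
        · have : PySem.Str.slice (PySem.Str.lower model_id) (some 0) (some 2) = "o3" := by simpa using h'
          rw [this]; decide
      · have : PySem.Str.slice (PySem.Str.lower model_id) (some 0) (some 2) = "o4" := by simpa using h
        rw [this]; decide
    rw [if_pos h9, if_pos (by rw [decide_eq_true hgt, Bool.true_and]; exact hco)]
  rw [if_neg h9]
  have hco : (["o1", "o3", "o4"].contains
      (PySem.Str.slice (PySem.Str.lower model_id) (some 0) (some 2))) = false := by
    simp only [Bool.or_eq_true, not_or] at h9
    simp_all
  have hcond : ∀ (b : Bool), (b && ["o1", "o3", "o4"].contains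
      (PySem.Str.slice (PySem.Str.lower model_id) (some 0) (some 2))) = false :=
    fun b => by rw [hco, Bool.and_false]
  rw [hcond, if_neg Bool.false_ne_true]
  by_cases h10 : PySem.Str.isIn "deepseek" (PySem.Str.lower model_id) = true
  · have hfold := gclFoldl_min (PySem.Str.lower model_id) gclRanked (11, 128000) ((8 : Int), (128000 : Int))
      (by norm_num)
      ⟨(["deepseek"], 8, 128000), by simp [gclRanked],
        by simp only [List.all_cons, List.all_nil, Bool.and_true]; exact h10, rfl⟩
      (by intro r hr hM; simp only [gclRanked] at hr; fin_cases hr <;> simp_all)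
    rw [if_pos h10, hfold]
  rw [if_neg h10]
  by_cases h11 : PySem.Str.isIn "llama" (PySem.Str.lower model_id) = true
  · have hfold := gclFoldl_min (PySem.Str.lower model_id) gclRanked (11, 128000) ((9 : Int), (128000 : Int))
      (by norm_num)
      ⟨(["llama"], 9, 128000), by simp [gclRanked],
        by simp only [List.all_cons, List.all_nil, Bool.and_true]; exact h11, rfl⟩
      (by intro r hr hM; simp only [gclRanked] at hr; fin_cases hr <;> simp_all)
    rw [if_pos h11, hfold]
  rw [if_neg h11]
  by_cases h12 : (["sora", "veo", "dall-e", "imagen", "flux", "sdxl"].any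
      fun t => PySem.Str.isIn t (PySem.Str.lower model_id)) = true
  · have hex : ∃ r ∈ gclRanked,
        (r.1.all fun w => PySem.Str.isIn w (PySem.Str.lower model_id)) = true ∧
          r.2 = ((10 : Int), (4096 : Int)) := by
      simp only [List.any_eq_true] at h12
      obtain ⟨t, ht, hIt⟩ := h12
      fin_cases ht
      · exact ⟨(["sora"], 10, 4096), by simp [gclRanked],
          by simp only [List.all_cons, List.all_nil, Bool.and_true]; exact hIt, rfl⟩
      · exact ⟨(["veo"], 10, 4096), by simp [gclRanked],
          by simp only [List.all_cons, List.all_nil, Bool.and_true]; exact hIt, rfl⟩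
      · exact ⟨(["dall-e"], 10, 4096), by simp [gclRanked],
          by simp only [List.all_cons, List.all_nil, Bool.and_true]; exact hIt, rfl⟩
      · exact ⟨(["imagen"], 10, 4096), by simp [gclRanked],
          by simp only [List.all_cons, List.all_nil, Bool.and_true]; exact hIt, rfl⟩
      · exact ⟨(["flux"], 10, 4096), by simp [gclRanked],
          by simp only [List.all_cons, List.all_nil, Bool.and_true]; exact hIt, rfl⟩
      · exact ⟨(["sdxl"], 10, 4096), by simp [gclRanked],
          by simp only [List.all_cons, List.all_nil, Bool.and_true]; exact hIt, rfl⟩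
    have hfold := gclFoldl_min (PySem.Str.lower model_id) gclRanked (11, 128000) ((10 : Int), (4096 : Int))
      (by norm_num) hex
      (by intro r hr hM; simp only [gclRanked] at hr; fin_cases hr <;> simp_all)
    rw [if_pos h12, hfold]
  · have hfold := gclFoldl_keep (PySem.Str.lower model_id) gclRanked (11, 128000)
      (by intro r hr hM; simp only [gclRanked] at hr; fin_cases hr <;> simp_all)
    rw [if_neg h12, hfold]
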